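-- pv_equiv track=rewrite | github.com/wj1224/algorithm_solve | programmers/python/programmers_12981.py | solution
-- ===== SOURCE A (Python) =====
-- def solution(n, words):
-- 	answer = [0, 0]
-- 	d = {}
-- 	idx_d = {}
-- 	idx = 1
-- 	prev = words[0][0]
--
-- 	for w in words:
-- 		d[w] = d.get(w, 0) + 1
-- 		idx_d[idx] = idx_d.get(idx, 0) + 1
-- 		if prev[-1] != w[0] or d[w] == 2:
-- 			answer = [idx, idx_d[idx]]
-- 			break
-- 		if idx < n:
-- 			idx += 1
-- 		else:
-- 			idx = 1
-- 		prev = w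
--
-- 	return answer
-- ===== SOURCE B (Python) =====
-- def solution(n, words):
--     first_break = next((i for i in range(1, len(words))
--                         if words[i][0] != words[i - 1][-1]), len(words))
--     first_seen = {}
--     for i, w in enumerate(words):
--         if w not in first_seen:
--             first_seen[w] = i
--     first_dup = next((i for i, w in enumerate(words) if first_seen[w] < i),
--                      len(words))
--     k = min(first_break, first_dup)
--     if k == len(words):
--         return [0, 0]
--     return [k % n + 1, k // n + 1]
-- ===== Notes on version B (the rewrite author's own statement) =====
-- stated objective: alternative
-- what changed: B replaces A's single stateful early-exit loop (rolling player counter idx, per-player turn dict idx_d, occurrence-count dict d) by three staged passes: it computes the first chain-break index over adjacent pairs and the first-repetition index via a first-occurrence index map independently, takes their minimum k, and derives player and turn in closed form as [k % n + 1, k // n + 1].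
-- outside the precondition, e.g. on solution(0, ['ab', 'ba', 'ab']): A returns [1, 3], B raises ZeroDivisionError; on solution(-2, ['ab', 'ba', 'ab']): A returns [1, 3], B returns [1, 0]; on solution(2, ['ab', 'ba', 'ab', '']): A returns [1, 2], B raises IndexError
import Mathlib
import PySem

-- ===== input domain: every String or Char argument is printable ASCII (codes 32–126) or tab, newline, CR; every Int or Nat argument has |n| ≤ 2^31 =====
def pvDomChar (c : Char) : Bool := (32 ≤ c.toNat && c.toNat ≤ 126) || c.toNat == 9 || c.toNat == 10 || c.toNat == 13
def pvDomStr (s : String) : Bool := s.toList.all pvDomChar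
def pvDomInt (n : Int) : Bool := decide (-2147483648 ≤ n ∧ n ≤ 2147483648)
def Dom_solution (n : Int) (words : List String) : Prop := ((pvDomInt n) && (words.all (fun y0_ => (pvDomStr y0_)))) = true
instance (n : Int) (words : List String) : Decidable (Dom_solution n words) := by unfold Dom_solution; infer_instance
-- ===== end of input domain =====

-- B replaces A's single stateful loop by three staged passes: the first chain-break index,
-- a first-occurrence index map giving the first-repetition index, and the minimum of the
-- two with player/turn derived in closed form (alternative decomposition, same cost).

-- ===== PORT A =====
-- the for-loop of A: state d (word counts), idx_d (per-player counts), idx, prev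
def solLoopA (n : Int) (d : PySem.Dict String Int) (idxd : PySem.Dict Int Int)
    (idx : Int) (prev : String) : List String → List Int
  | [] => [0, 0]
  | w :: ws =>
    let d' := d.insert w (d.getD w 0 + 1)
    let idxd' := idxd.insert idx (idxd.getD idx 0 + 1)
    match PySem.Str.pyGet? prev (-1), PySem.Str.pyGet? w 0 with
    | some pl, some w0 =>
      if pl ≠ w0 ∨ d'.getD w 0 = 2 then [idx, idxd'.getD idx 0]
      else solLoopA n d' idxd' (if idx < n then idx + 1 else 1) w ws
    | _, _ => []       -- IndexError on an empty string (excluded by Pre_)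

def solution (n : Int) (words : List String) : List Int :=
  match PySem.List.pyGet? words 0 with
  | none => []         -- IndexError: words == [] (excluded by Pre_)
  | some w0 =>
    match PySem.Str.pyGet? w0 0 with
    | none => []       -- IndexError: words[0] == '' (excluded by Pre_)
    | some c => solLoopA n PySem.Dict.empty PySem.Dict.empty 1 (String.ofList [c]) words

-- ===== PORT B =====
-- pass 1: first index i ≥ 1 with words[i][0] != words[i-1][-1], default len(words)
def fbLoop (i : Nat) (prev : String) : List String → Nat
  | [] => i
  | w :: ws =>
    match PySem.Str.pyGet? w 0, PySem.Str.pyGet? prev (-1) with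
    | some wc, some pc => if wc ≠ pc then i else fbLoop (i + 1) w ws
    | _, _ => i        -- IndexError on an empty word (excluded by Pre_)

-- pass 2: dict mapping each word to its first index
def buildFS (i : Nat) (fs : PySem.Dict String Int) : List String → PySem.Dict String Int
  | [] => fs
  | w :: ws => buildFS (i + 1) (if fs.contains w then fs else fs.insert w (i : Int)) ws

-- pass 3: first index i with first_seen[words[i]] < i, default len(words)
-- (first_seen[w] cannot raise KeyError: every word was inserted in pass 2; getD is exact here)
def fdLoop (i : Nat) (fs : PySem.Dict String Int) : List String → Nat
  | [] => i
  | w :: ws => if fs.getD w 0 < (i : Int) then i else fdLoop (i + 1) fs ws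

def solution_alt (n : Int) (words : List String) : List Int :=
  let fb := match words with | [] => 0 | w :: ws => fbLoop 1 w ws
  let fs := buildFS 0 PySem.Dict.empty words
  let fd := fdLoop 0 fs words
  let k := min fb fd
  if k = words.length then [0, 0]
  else [PySem.Int.mod (k : Int) n + 1, PySem.Int.floordiv (k : Int) n + 1]

-- ===== PRECONDITION & SPEC =====
-- Pre_ restricts to the game's natural domain: at least one player (n ≤ 0 is outside the word-chain
-- game's meaning; there A's pinned idx pattern is accidental and B raises ZeroDivisionError or
-- differs) and a nonempty list of nonempty words (an empty word reached by either scan raises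
-- IndexError; requiring ALL words nonempty slightly over-excludes words after the break point).
def Pre_solution (n : Int) (words : List String) : Prop :=
  1 ≤ n ∧ words ≠ [] ∧ ∀ w ∈ words, w ≠ ""
instance (n : Int) (words : List String) : Decidable (Pre_solution n words) := by
  unfold Pre_solution; infer_instance

def pvWitness_solution : Int × List String := (2, ["ab", "ba", "ab"])

def Spec_solution (n : Int) (words : List String) (out : List Int) : Prop := out = solution_alt n words
instance (n : Int) (words : List String) (out : List Int) : Decidable (Spec_solution n words out) := by
  unfold Spec_solution; infer_instance

-- ===== CLAIM (what is proved, stated in full; the proofs are below) =====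
def Claim_equal_solution : Prop := ∀ (n : Int) (words : List String),
  Dom_solution n words → Pre_solution n words → Spec_solution n words (solution n words)

-- ===== LEMMAS AND PROOFS =====

-- proof-side single-pass reference loop: break at the first i > 0 with a chain break or a
-- word already seen, returning [i % n + 1, i // n + 1]; both ports are reduced to it
def specLoop (n : Int) (seen : PySem.Set String) (prev : String) (i : Int) : List String → List Int
  | [] => [0, 0]
  | w :: ws =>
    if i > 0 then
      match PySem.Str.pyGet? w 0, PySem.Str.pyGet? prev (-1) with
      | some wc, some pc =>
        if wc ≠ pc ∨ seen.contains w = true then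
          [PySem.Int.mod i n + 1, PySem.Int.floordiv i n + 1]
        else specLoop n (seen.add w) w (i + 1) ws
      | _, _ => []     -- IndexError on an empty string (excluded by Pre_)
    else specLoop n (seen.add w) w (i + 1) ws

-- ---------- A-side: reduce solution to specLoop ----------

-- the count A's idx_d holds for player key k after j non-breaking iterations
def vcnt (n : Int) (j : Nat) (k : Int) : Int :=
  if 1 ≤ k ∧ k ≤ n ∧ k - 1 < (j : Int) then
    (j : Int) / n + (if k - 1 < (j : Int) % n then 1 else 0)
  else 0

lemma divmod_step (n j : Int) (hn : 1 ≤ n) (hj : 0 ≤ j) :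
    ((j + 1) % n = if j % n + 1 = n then 0 else j % n + 1) ∧
    ((j + 1) / n = if j % n + 1 = n then j / n + 1 else j / n) := by
  have h0 : 0 ≤ j % n := Int.emod_nonneg j (by omega)
  have h1 : j % n < n := Int.emod_lt_of_pos j (by omega)
  have h2 : n * (j / n) + j % n = j := Int.ediv_add_emod j n
  by_cases hc : j % n + 1 = n
  · have hq : (j + 1) / n = j / n + 1 ∧ (j + 1) % n = 0 :=
      Int.ediv_emod_unique (by omega) |>.mpr ⟨by nlinarith, by omega, by omega⟩
    simp [hc, hq.1, hq.2]
  · have hq : (j + 1) / n = j / n ∧ (j + 1) % n = j % n + 1 :=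
      Int.ediv_emod_unique (by omega) |>.mpr ⟨by nlinarith, by omega, by omega⟩
    simp [hc, hq.1, hq.2]

lemma dm_pack (n : Int) (hn : 1 ≤ n) (j : Nat) {q r : Int}
    (hq : (j : Int) / n = q) (hr : (j : Int) % n = r) :
    0 ≤ r ∧ r < n ∧ r ≤ (j : Int) ∧ 0 ≤ q ∧ ((j : Int) < n → q = 0 ∧ r = (j : Int)) := by
  have hj : (0 : Int) ≤ (j : Int) := Int.natCast_nonneg j
  have h0 : 0 ≤ r := by rw [← hr]; exact Int.emod_nonneg _ (by omega)
  have h1 : r < n := by rw [← hr]; exact Int.emod_lt_of_pos _ (by omega)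
  have h4 : 0 ≤ q := by rw [← hq]; exact Int.ediv_nonneg hj (by omega)
  have h5 : (j : Int) < n → q = 0 ∧ r = (j : Int) := fun h =>
    ⟨by rw [← hq]; exact Int.ediv_eq_zero_of_lt hj h,
     by rw [← hr]; exact Int.emod_eq_of_lt hj h⟩
  refine ⟨h0, h1, ?_, h4, h5⟩
  by_cases hlt : (j : Int) < n
  · have := (h5 hlt).2; omega
  · omega

lemma vcnt_zero (n : Int) (k : Int) : vcnt n 0 k = 0 := by
  unfold vcnt
  split_ifs with h h2 <;> first | rfl | (exfalso; omega)

lemma vcnt_at_idx (n : Int) (hn : 1 ≤ n) (j : Nat) :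
    vcnt n j ((j : Int) % n + 1) = (j : Int) / n := by
  obtain ⟨q, r, hq, hr⟩ : ∃ q r, (j : Int) / n = q ∧ (j : Int) % n = r := ⟨_, _, rfl, rfl⟩
  obtain ⟨h0, h1, h3, h4, h5⟩ := dm_pack n hn j hq hr
  unfold vcnt
  rw [hq, hr]
  by_cases hlt : (j : Int) < n
  · obtain ⟨e1, e2⟩ := h5 hlt
    split_ifs <;> omega
  · split_ifs <;> omega

lemma vcnt_step (n : Int) (hn : 1 ≤ n) (j : Nat) (k : Int) :
    vcnt n (j + 1) k = if k = (j : Int) % n + 1 then vcnt n j k + 1 else vcnt n j k := by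
  obtain ⟨q, r, hq, hr⟩ : ∃ q r, (j : Int) / n = q ∧ (j : Int) % n = r := ⟨_, _, rfl, rfl⟩
  obtain ⟨h0, h1, h3, h4, h5⟩ := dm_pack n hn j hq hr
  have hds := divmod_step n (j : Int) hn (Int.natCast_nonneg j)
  rw [hq, hr] at hds
  unfold vcnt
  push_cast
  rw [hds.1, hds.2, hq, hr]
  by_cases hlt : (j : Int) < n
  · obtain ⟨e1, e2⟩ := h5 hlt
    split_ifs <;> omega
  · split_ifs <;> omega

lemma idx_step (n : Int) (hn : 1 ≤ n) (j : Nat) :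
    (if (j : Int) % n + 1 < n then (j : Int) % n + 1 + 1 else 1) = ((j : Int) + 1) % n + 1 := by
  obtain ⟨q, r, hq, hr⟩ : ∃ q r, (j : Int) / n = q ∧ (j : Int) % n = r := ⟨_, _, rfl, rfl⟩
  obtain ⟨h0, h1, h3, h4, h5⟩ := dm_pack n hn j hq hr
  have hds := divmod_step n (j : Int) hn (Int.natCast_nonneg j)
  rw [hq, hr] at hds
  rw [hds.1, hr]
  split_ifs <;> omega

lemma loop_eq (n : Int) (hn : 1 ≤ n) :
    ∀ (ws : List String) (j : Nat) (d : PySem.Dict String Int) (idxd : PySem.Dict Int Int)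
      (seen : PySem.Set String) (prev : String),
      1 ≤ j →
      (∀ v, d.getD v 0 = 0 ∨ d.getD v 0 = 1) →
      (∀ v, d.getD v 0 = 1 ↔ v ∈ seen) →
      (∀ k, idxd.getD k 0 = vcnt n j k) →
      solLoopA n d idxd ((j : Int) % n + 1) prev ws = specLoop n seen prev (j : Int) ws := by
  intro ws
  induction ws with
  | nil => intro j d idxd seen prev _ _ _ _; rfl
  | cons w ws ih =>
    intro j d idxd seen prev hj hd01 hds hidxd
    have hjpos : (0 : Int) < (j : Int) := by omega
    have hnpos : (0 : Int) < n := by omega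
    simp only [solLoopA, specLoop]
    rw [if_pos hjpos]
    cases hpw : PySem.Str.pyGet? prev (-1) with
    | none =>
      cases hw0 : PySem.Str.pyGet? w 0 <;> rfl
    | some pl =>
      cases hw0 : PySem.Str.pyGet? w 0 with
      | none => rfl
      | some wc =>
        have hmem : seen.contains w = true ↔ w ∈ seen := by simp [PySem.Set.contains]
        have hd2 : (d.insert w (d.getD w 0 + 1)).getD w 0 = d.getD w 0 + 1 :=
          PySem.Dict.getD_insert_self d w _ 0
        have hcond : (pl ≠ wc ∨ d.getD w 0 + 1 = 2) ↔ (wc ≠ pl ∨ seen.contains w = true) := by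
          constructor
          · rintro (h | h)
            · exact Or.inl (Ne.symm h)
            · exact Or.inr (hmem.mpr ((hds w).mp (by omega)))
          · rintro (h | h)
            · exact Or.inl (Ne.symm h)
            · exact Or.inr (by have := (hds w).mpr (hmem.mp h); omega)
        rw [hd2]
        dsimp only
        by_cases hbr : wc ≠ pl ∨ seen.contains w = true
        · rw [if_pos (hcond.mpr hbr), if_pos hbr]
          rw [PySem.Dict.getD_insert_self, hidxd, vcnt_at_idx n hn j,
              PySem.Int.mod_eq_emod_of_pos hnpos, PySem.Int.floordiv_eq_ediv_of_pos hnpos]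
        · rw [if_neg (fun h => hbr (hcond.mp h)), if_neg hbr]
          have hw_not : w ∉ seen := fun hm => hbr (Or.inr (hmem.mpr hm))
          have hd0 : d.getD w 0 = 0 := by
            rcases hd01 w with h | h
            · exact h
            · exact absurd ((hds w).mp h) hw_not
          rw [idx_step n hn j]
          have key := ih (j + 1) (d.insert w (d.getD w 0 + 1))
            (idxd.insert ((j : Int) % n + 1) (idxd.getD ((j : Int) % n + 1) 0 + 1))
            (seen.add w) w (by omega)
            (by
              intro v
              rw [PySem.Dict.getD_insert]
              split_ifs with hv
              · right; omega
              · exact hd01 v)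
            (by
              intro v
              rw [PySem.Dict.getD_insert, PySem.Set.mem_add]
              split_ifs with hv
              · constructor
                · intro _; exact Or.inr hv
                · intro _; omega
              · rw [hds v]
                constructor
                · exact Or.inl
                · rintro (h | h)
                  · exact h
                  · exact absurd h hv)
            (by
              intro k
              rw [PySem.Dict.getD_insert, hidxd k, hidxd ((j : Int) % n + 1),
                  vcnt_step n hn j k]
              split_ifs with hk
              · rw [hk]
              · rfl)
          push_cast at key
          exact key

-- vcnt after the very first (never-breaking) iteration
lemma vcnt_one (n : Int) (hn : 1 ≤ n) (k : Int) :
    vcnt n 1 k = if k = 1 then 1 else 0 := by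
  have h := vcnt_step n hn 0 k
  simp only [Nat.cast_zero, Int.zero_emod, zero_add, vcnt_zero] at h
  exact h

lemma A_eq_spec (n : Int) (words : List String)
    (hn : 1 ≤ n) (hne : words ≠ []) (hnz : ∀ w ∈ words, w ≠ "") :
    solution n words = specLoop n PySem.Set.empty "" 0 words := by
  have hnpos : (0 : Int) < n := by omega
  cases words with
  | nil => exact absurd rfl hne
  | cons w0 ws =>
    have hw0 : w0 ≠ "" := hnz w0 (by simp)
    obtain ⟨c, cs, htl⟩ : ∃ c cs, w0.toList = c :: cs := by
      cases h : w0.toList with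
      | nil => exact absurd (by cases w0; simp_all) hw0
      | cons c cs => exact ⟨c, cs, rfl⟩
    have hget0 : PySem.Str.pyGet? w0 0 = some c := by
      rw [show (0 : Int) = ((0 : Nat) : Int) by simp, PySem.Str.pyGet?_natCast, htl]; rfl
    have hprev : PySem.Str.pyGet? (String.ofList [c]) (-1) = some c := by
      simp [PySem.Str.pyGet?, PySem.List.pyGet?_neg_one]
    unfold solution
    rw [PySem.List.pyGet?_zero_cons]
    dsimp only
    rw [hget0]
    dsimp only
    simp only [solLoopA, specLoop]
    rw [if_neg (by omega : ¬ (0 : Int) > 0)]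
    rw [hprev, hget0]
    dsimp only
    rw [if_neg (by simp [PySem.Dict.getD_insert_self, PySem.Dict.getD_empty])]
    have hidx1 : (if (1 : Int) < n then 1 + 1 else 1) = ((1 : Nat) : Int) % n + 1 := by
      have h := idx_step n hn 0
      simp only [Nat.cast_zero, Int.zero_emod, zero_add] at h
      push_cast
      rw [← h]
      norm_num
    rw [hidx1]
    have key := loop_eq n hn ws 1 (PySem.Dict.empty.insert w0 (PySem.Dict.empty.getD w0 0 + 1))
      (PySem.Dict.empty.insert 1 (PySem.Dict.empty.getD 1 0 + 1))
      (PySem.Set.empty.add w0) w0 (by omega)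
      (by
        intro v
        rw [PySem.Dict.getD_insert]
        split_ifs with hv
        · right; rw [PySem.Dict.getD_empty]; norm_num
        · left; rw [PySem.Dict.getD_empty])
      (by
        intro v
        rw [PySem.Dict.getD_insert, PySem.Set.mem_add]
        split_ifs with hv
        · rw [PySem.Dict.getD_empty]
          constructor
          · intro _; exact Or.inr hv
          · intro _; norm_num
        · rw [PySem.Dict.getD_empty]
          constructor
          · intro h; norm_num at h
          · rintro (h | h)
            · simp [PySem.Set.empty] at h
            · exact absurd h hv)
      (by
        intro k
        rw [PySem.Dict.getD_insert, vcnt_one n hn k]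
        split_ifs with hv
        · rw [PySem.Dict.getD_empty]; norm_num
        · rw [PySem.Dict.getD_empty])
    push_cast at key
    exact key

-- ---------- B-side: reduce solution_alt to specLoop ----------

lemma fbLoop_ge : ∀ (ws : List String) (i : Nat) (prev : String), i ≤ fbLoop i prev ws := by
  intro ws
  induction ws with
  | nil => intro i prev; simp [fbLoop]
  | cons w ws ih =>
    intro i prev
    simp only [fbLoop]
    cases PySem.Str.pyGet? w 0 with
    | none => exact le_refl i
    | some wc =>
      cases PySem.Str.pyGet? prev (-1) with
      | none => exact le_refl i
      | some pc =>
        dsimp only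
        split_ifs
        · exact le_refl i
        · exact le_trans (Nat.le_succ i) (ih (i + 1) w)

lemma fdLoop_ge : ∀ (ws : List String) (i : Nat) (fs : PySem.Dict String Int), i ≤ fdLoop i fs ws := by
  intro ws
  induction ws with
  | nil => intro i fs; simp [fdLoop]
  | cons w ws ih =>
    intro i fs
    simp only [fdLoop]
    split_ifs
    · exact le_refl i
    · exact le_trans (Nat.le_succ i) (ih (i + 1) fs)

-- the invariant buildFS maintains: fs maps exactly the words of the processed prefix,
-- each to its first index, expressed through membership in prefixes
def FSInv (fs : PySem.Dict String Int) (pre : List String) : Prop :=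
  (∀ (w : String) (m : Nat), (∃ v : Int, fs.get? w = some v ∧ v < (m : Int)) ↔ w ∈ pre.take m) ∧
  (∀ (w : String) (v : Int), fs.get? w = some v → 0 ≤ v ∧ v < (pre.length : Int))

lemma mem_take_append_singleton (u w : String) (pre : List String) (m : Nat) :
    u ∈ (pre ++ [w]).take m ↔ u ∈ pre.take m ∨ (u = w ∧ pre.length < m) := by
  rw [List.take_append, List.mem_append]
  by_cases hm : pre.length < m
  · have h1 : m - pre.length = (m - pre.length - 1) + 1 := by omega
    rw [h1]
    simp only [List.take_succ_cons, List.take_nil, List.mem_singleton]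
    constructor
    · rintro (h | h)
      · exact Or.inl h
      · exact Or.inr ⟨h, hm⟩
    · rintro (h | ⟨h, _⟩)
      · exact Or.inl h
      · exact Or.inr h
  · have h1 : m - pre.length = 0 := by omega
    rw [h1]
    simp only [List.take_zero, List.not_mem_nil, or_false]
    constructor
    · exact Or.inl
    · rintro (h | ⟨_, h⟩)
      · exact h
      · exact absurd h hm

lemma buildFS_inv : ∀ (ws pre : List String) (fs : PySem.Dict String Int),
    FSInv fs pre → FSInv (buildFS pre.length fs ws) (pre ++ ws) := by
  intro ws
  induction ws with
  | nil => intro pre fs h; simpa [buildFS] using h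
  | cons w ws ih =>
    intro pre fs hinv
    obtain ⟨h1, h2⟩ := hinv
    have hcs := PySem.Dict.contains_eq_isSome_get? fs w
    have hnext : FSInv (if fs.contains w then fs else fs.insert w (pre.length : Int)) (pre ++ [w]) := by
      by_cases hc : fs.contains w
      · rw [if_pos hc]
        obtain ⟨v, hv⟩ : ∃ v, fs.get? w = some v := by
          rw [hc] at hcs
          exact Option.isSome_iff_exists.mp hcs.symm
        constructor
        · intro u m
          rw [mem_take_append_singleton]
          constructor
          · intro hex
            exact Or.inl ((h1 u m).mp hex)
          · rintro (hu | ⟨rfl, hm⟩)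
            · exact (h1 u m).mpr hu
            · exact ⟨v, hv, by have := (h2 u v hv).2; omega⟩
        · intro u vu hu
          have := h2 u vu hu
          simp only [List.length_append, List.length_cons, List.length_nil]
          omega
      · rw [if_neg hc]
        have hnone : fs.get? w = none := by
          rw [Bool.eq_false_iff.mpr hc] at hcs
          exact Option.not_isSome_iff_eq_none.mp (by rw [← hcs]; simp)
        constructor
        · intro u m
          rw [mem_take_append_singleton, PySem.Dict.get?_insert]
          by_cases hu : u = w
          · subst hu
            rw [if_pos rfl]
            have hnp : ∀ m', u ∉ pre.take m' := by
              intro m' hmem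
              have h := (h1 u m').mpr hmem
              rw [hnone] at h
              obtain ⟨v, hv, _⟩ := h
              simp at hv
            constructor
            · rintro ⟨v, hv, hvm⟩
              injection hv with hv
              exact Or.inr ⟨rfl, by omega⟩
            · rintro (hmem | ⟨_, hm⟩)
              · exact absurd hmem (hnp m)
              · exact ⟨(pre.length : Int), rfl, by omega⟩
          · rw [if_neg hu]
            constructor
            · intro hex
              exact Or.inl ((h1 u m).mp hex)
            · rintro (hmem | ⟨huw, _⟩)
              · exact (h1 u m).mpr hmem
              · exact absurd huw hu
        · intro u vu hu
          rw [PySem.Dict.get?_insert] at hu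
          simp only [List.length_append, List.length_cons, List.length_nil]
          by_cases huw : u = w
          · rw [if_pos huw] at hu
            injection hu with hu
            omega
          · rw [if_neg huw] at hu
            have := h2 u vu hu
            omega
    have h := ih (pre ++ [w]) _ hnext
    simp only [List.length_append, List.length_cons, List.length_nil, List.append_assoc,
      List.singleton_append] at h
    simpa [buildFS] using h

lemma altLoop (n : Int) (words : List String) (fs : PySem.Dict String Int)
    (HInv : ∀ (w : String) (m : Nat),
      (∃ v : Int, fs.get? w = some v ∧ v < (m : Int)) ↔ w ∈ words.take m) :
    ∀ (ws : List String) (j : Nat) (prev : String) (seen : PySem.Set String),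
      1 ≤ j → words.drop j = ws → (∀ w ∈ ws, w ≠ "") → prev ≠ "" →
      (∀ u, u ∈ seen ↔ u ∈ words.take j) →
      specLoop n seen prev (j : Int) ws =
        (if min (fbLoop j prev ws) (fdLoop j fs ws) = j + ws.length then ([0, 0] : List Int)
         else [PySem.Int.mod ((min (fbLoop j prev ws) (fdLoop j fs ws) : Nat) : Int) n + 1,
               PySem.Int.floordiv ((min (fbLoop j prev ws) (fdLoop j fs ws) : Nat) : Int) n + 1]) := by
  intro ws
  induction ws with
  | nil => intro j prev seen hj _ _ _ _; simp [specLoop, fbLoop, fdLoop]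
  | cons w ws ih =>
    intro j prev seen hj hdrop hnz hprev hseen
    have hjpos : (0 : Int) < (j : Int) := by omega
    have hw : w ≠ "" := hnz w (by simp)
    obtain ⟨wc, cs, hwl⟩ : ∃ c cs, w.toList = c :: cs := by
      cases h : w.toList with
      | nil => exact absurd (by cases w; simp_all) hw
      | cons c cs => exact ⟨c, cs, rfl⟩
    have hgw : PySem.Str.pyGet? w 0 = some wc := by
      rw [show (0 : Int) = ((0 : Nat) : Int) by simp, PySem.Str.pyGet?_natCast, hwl]; rfl
    obtain ⟨pc, hgp⟩ : ∃ c, PySem.Str.pyGet? prev (-1) = some c := by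
      have hpl : prev.toList ≠ [] := by
        intro h; exact hprev (by cases prev; simp_all)
      rw [show PySem.Str.pyGet? prev (-1) = PySem.List.pyGet? prev.toList (-1) from rfl,
        PySem.List.pyGet?_neg_one]
      exact Option.isSome_iff_exists.mp (by simp [List.getLast?_isSome, hpl])
    -- facts from words.drop j = w :: ws
    have hgetj : words[j]? = some w := by
      have h := List.getElem?_drop (xs := words) (i := j) (j := 0)
      rw [hdrop] at h
      simpa using h.symm
    have hw_mem : w ∈ words := List.mem_of_getElem? hgetj
    have htake : words.take (j + 1) = words.take j ++ [w] := by
      rw [List.take_succ, hgetj]; rfl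
    have hdrop' : words.drop (j + 1) = ws := by
      have h : words.drop (j + 1) = (words.drop j).drop 1 := by rw [List.drop_drop]
      rw [h, hdrop]; rfl
    -- the duplicate test of pass 3 is membership in the already-spoken prefix
    obtain ⟨v, hv, hvlen⟩ : ∃ v, fs.get? w = some v ∧ v < (words.length : Int) :=
      (HInv w words.length).mpr (by simpa [List.take_length] using hw_mem)
    have hgetD : fs.getD w 0 = v := PySem.Dict.getD_of_get?_eq_some fs 0 hv
    have hdup : fs.getD w 0 < (j : Int) ↔ w ∈ words.take j := by
      rw [hgetD]
      constructor
      · intro h; exact (HInv w j).mp ⟨v, hv, h⟩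
      · intro h
        obtain ⟨v', hv', hlt⟩ := (HInv w j).mpr h
        rw [hv] at hv'; injection hv' with hv'; omega
    have hmem : seen.contains w = true ↔ w ∈ seen := by simp [PySem.Set.contains]
    have hfb : fbLoop j prev (w :: ws) = if wc ≠ pc then j else fbLoop (j + 1) w ws := by
      simp only [fbLoop]
      rw [hgw, hgp]
    have hfd : fdLoop j fs (w :: ws) =
        if fs.getD w 0 < (j : Int) then j else fdLoop (j + 1) fs ws := by
      simp only [fdLoop]
    have hsl : specLoop n seen prev (j : Int) (w :: ws) =
        (if wc ≠ pc ∨ seen.contains w = true then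
          [PySem.Int.mod (j : Int) n + 1, PySem.Int.floordiv (j : Int) n + 1]
        else specLoop n (seen.add w) w ((j : Int) + 1) ws) := by
      simp only [specLoop]
      rw [if_pos hjpos, hgw, hgp]
    rw [hsl, hfb, hfd]
    have harith : j + (w :: ws).length = (j + 1) + ws.length := by simp; omega
    by_cases hbr : wc ≠ pc ∨ seen.contains w = true
    · rw [if_pos hbr]
      have hmin : min (if wc ≠ pc then j else fbLoop (j + 1) w ws)
          (if fs.getD w 0 < (j : Int) then j else fdLoop (j + 1) fs ws) = j := by
        rcases hbr with h | h
        · rw [if_pos h]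
          refine Nat.min_eq_left ?_
          split_ifs
          · exact le_refl j
          · exact le_trans (Nat.le_succ j) (fdLoop_ge ws (j + 1) fs)
        · have hlt : fs.getD w 0 < (j : Int) := hdup.mpr ((hseen w).mp (hmem.mp h))
          rw [if_pos hlt]
          refine Nat.min_eq_right ?_
          split_ifs
          · exact le_refl j
          · exact le_trans (Nat.le_succ j) (fbLoop_ge ws (j + 1) w)
      rw [hmin]
      rw [if_neg (by simp only [List.length_cons]; omega)]
    · rw [if_neg hbr]
      push_neg at hbr
      obtain ⟨hwc, hcont⟩ := hbr
      rw [if_neg (show ¬ wc ≠ pc from fun h => h hwc)]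
      have hnot_seen : w ∉ seen := fun h => hcont (hmem.mpr h)
      have hnot_take : ¬ fs.getD w 0 < (j : Int) := fun h =>
        hnot_seen ((hseen w).mpr (hdup.mp h))
      rw [if_neg hnot_take]
      have hseen' : ∀ u, u ∈ seen.add w ↔ u ∈ words.take (j + 1) := by
        intro u
        rw [PySem.Set.mem_add, htake, List.mem_append, hseen u]
        simp [eq_comm]
      have key := ih (j + 1) w (seen.add w) (by omega) hdrop'
        (fun u hu => hnz u (by simp [hu])) hw hseen'
      rw [show ((j : Int) + 1) = (((j + 1 : Nat)) : Int) by push_cast; ring, key, harith]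

lemma B_eq_spec (n : Int) (words : List String)
    (hne : words ≠ []) (hnz : ∀ w ∈ words, w ≠ "") :
    solution_alt n words = specLoop n PySem.Set.empty "" 0 words := by
  cases words with
  | nil => exact absurd rfl hne
  | cons w0 ws =>
    have hinv := buildFS_inv (w0 :: ws) [] PySem.Dict.empty
      (by
        constructor
        · intro w m
          simp [PySem.Dict.get?_empty]
        · intro w v h
          rw [PySem.Dict.get?_empty] at h
          simp at h)
    simp only [List.length_nil, List.nil_append] at hinv
    obtain ⟨HInv, Hbnd⟩ := hinv
    have hw0 : w0 ≠ "" := hnz w0 (by simp)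
    -- pass 3 does not fire at index 0: first-occurrence indices are nonnegative
    have hfd0 : fdLoop 0 (buildFS 0 PySem.Dict.empty (w0 :: ws)) (w0 :: ws) =
        fdLoop 1 (buildFS 0 PySem.Dict.empty (w0 :: ws)) ws := by
      simp only [fdLoop]
      rw [if_neg]
      intro hlt
      cases h : (buildFS 0 PySem.Dict.empty (w0 :: ws)).get? w0 with
      | none => rw [PySem.Dict.getD_of_get?_eq_none _ 0 h] at hlt; omega
      | some v =>
        rw [PySem.Dict.getD_of_get?_eq_some _ 0 h] at hlt
        have := (Hbnd w0 v h).1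
        omega
    have hspec0 : specLoop n PySem.Set.empty "" 0 (w0 :: ws) =
        specLoop n (PySem.Set.empty.add w0) w0 1 ws := by
      simp only [specLoop]
      rw [if_neg (by omega : ¬ (0 : Int) > 0)]
      norm_num
    have hseen1 : ∀ u, u ∈ PySem.Set.empty.add w0 ↔ u ∈ (w0 :: ws).take 1 := by
      intro u
      rw [PySem.Set.mem_add]
      simp [PySem.Set.empty, eq_comm]
    have key := altLoop n (w0 :: ws) (buildFS 0 PySem.Dict.empty (w0 :: ws)) HInv ws 1 w0
      (PySem.Set.empty.add w0) (le_refl 1) (by simp) (fun u hu => hnz u (by simp [hu])) hw0 hseen1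
    rw [Nat.cast_one] at key
    have hlen : (w0 :: ws).length = 1 + ws.length := by simp [Nat.add_comm]
    unfold solution_alt
    dsimp only
    rw [hfd0, hlen, hspec0, key]

-- ===== VERDICT (by name: the statement is the Claim_ definition above) =====
theorem solution_spec : Claim_equal_solution := by
  intro n words _ hpre
  obtain ⟨hn, hne, hnz⟩ := hpre
  unfold Spec_solution
  rw [A_eq_spec n words hn hne hnz, B_eq_spec n words hne hnz]
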